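-- pv_equiv track=rewrite | github.com/Danaila-Andrei/Python-Task | mat-cache.py | numara_clustere_de_trei
-- ===== SOURCE A (Python) =====
-- def numara_clustere_de_trei(matrix):
--     count = 0
--     rows, cols = len(matrix), len(matrix[0])
--     visited = set()
--
--     def dfs(i, j, cluster):
--         if i < 0 or i >= rows or j < 0 or j >= cols or matrix[i][j] != '1' or (i, j) in visited:
--             return cluster
--         visited.add((i, j))
--         cluster.add((i, j))
--         if len(cluster) > 3:
--             return set()
--         for x, y in [(i - 1, j), (i + 1, j), (i, j - 1), (i, j + 1),
--                      (i - 1, j - 1), (i - 1, j + 1), (i + 1, j - 1), (i + 1, j + 1)]: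
--             cluster = dfs(x, y, cluster)
--             if len(cluster) > 3:
--                 return set()
--         return cluster
--
--     def is_isolated(cluster):
--         for i, j in cluster:
--             for x, y in [(i - 1, j), (i + 1, j), (i, j - 1), (i, j + 1),
--                          (i - 1, j - 1), (i - 1, j + 1), (i + 1, j - 1), (i + 1, j + 1)]:
--                 if 0 <= x < rows and 0 <= y < cols and matrix[x][y] == '1' and (x, y) not in cluster:
--                     return False
--         return True
--
--     for i in range(rows):
--         for j in range(cols):
--             if matrix[i][j] == '1' and (i, j) not in visited:
--                 cluster = dfs(i, j, set())
--                 if len(cluster) == 3 and is_isolated(cluster):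
--                     count += 1
--     return count
-- ===== SOURCE B (Python) =====
-- def numara_clustere_de_trei(matrix):
--     rows, cols = len(matrix), len(matrix[0])
--     NB = ((-1, 0), (1, 0), (0, -1), (0, 1),
--           (-1, -1), (-1, 1), (1, -1), (1, 1))
--     visited = set()
--     count = 0
--     for si in range(rows):
--         for sj in range(cols):
--             if matrix[si][sj] != '1' or (si, sj) in visited:
--                 continue
--             # iterative DFS with an explicit stack; the running cluster is
--             # reset to empty whenever it reaches four cells (as in A)
--             cluster = set()
--             stack = [(si, sj)]
--             while stack:
--                 i, j = stack.pop()
--                 if i < 0 or i >= rows or j < 0 or j >= cols \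
--                         or matrix[i][j] != '1' or (i, j) in visited:
--                     continue
--                 visited.add((i, j))
--                 cluster.add((i, j))
--                 if len(cluster) > 3:
--                     cluster = set()
--                     continue
--                 for dx, dy in reversed(NB):
--                     stack.append((i + dx, j + dy))
--             if len(cluster) == 3 and all(
--                     not (0 <= i + dx < rows and 0 <= j + dy < cols
--                          and matrix[i + dx][j + dy] == '1'
--                          and (i + dx, j + dy) not in cluster)
--                     for i, j in cluster for dx, dy in NB):
--                 count += 1
--     return count
-- ===== Notes on version B (the rewrite author's own statement) =====
-- stated objective: alternative
-- what changed: The recursive dfs (8-way, with the cluster reset to empty whenever it reaches four cells) is replaced by an iterative explicit-stack traversal that pushes neighbours in reversed order and marks/collects on pop, and is_isolated's nested early-return loops are replaced by a single all() over the cluster-x-directions product.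
import Mathlib
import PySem

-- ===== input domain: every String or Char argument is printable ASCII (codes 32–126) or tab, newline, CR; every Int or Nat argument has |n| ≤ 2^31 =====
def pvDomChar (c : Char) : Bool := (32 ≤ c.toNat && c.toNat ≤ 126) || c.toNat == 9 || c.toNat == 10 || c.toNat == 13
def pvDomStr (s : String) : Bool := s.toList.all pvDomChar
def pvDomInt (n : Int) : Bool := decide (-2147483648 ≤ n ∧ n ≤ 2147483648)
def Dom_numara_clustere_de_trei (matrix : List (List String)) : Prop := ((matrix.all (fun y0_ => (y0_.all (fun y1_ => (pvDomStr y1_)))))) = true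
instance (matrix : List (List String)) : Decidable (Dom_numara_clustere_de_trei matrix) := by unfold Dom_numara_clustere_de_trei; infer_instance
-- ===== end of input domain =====

-- B replaces A's recursive dfs by an iterative explicit-stack traversal (same visit order,
-- same cluster resets) and the nested early-return isolation loops by one all() over a product;
-- same asymptotic cost (objective: alternative).

-- matrix[i][j] (none = IndexError; only reached outside Pre_)
def pvCell (matrix : List (List String)) (i j : Int) : Option String :=
  (PySem.List.pyGet? matrix i).bind (fun row => PySem.List.pyGet? row j)

-- the 8 neighbours of (i, j), in A's order
def pvNbrs (i j : Int) : List (Int × Int) :=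
  [(i-1,j), (i+1,j), (i,j-1), (i,j+1), (i-1,j-1), (i-1,j+1), (i+1,j-1), (i+1,j+1)]

-- the skip condition both Pythons write verbatim:
-- i < 0 or i >= rows or j < 0 or j >= cols or matrix[i][j] != '1' or (i, j) in visited
def pvGuard (matrix : List (List String)) (rows cols : Int)
    (v : PySem.Set (Int × Int)) (i j : Int) : Bool :=
  decide (i < 0) || decide (rows ≤ i) || decide (j < 0) || decide (cols ≤ j) ||
    !(pvCell matrix i j == some "1") || PySem.Set.contains v (i, j)

-- the condition of is_isolated's inner if (identical text in both Pythons)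
def pvIsBad (matrix : List (List String)) (rows cols : Int)
    (cluster : PySem.Set (Int × Int)) (c : Int × Int) : Bool :=
  decide (0 ≤ c.1) && decide (c.1 < rows) && decide (0 ≤ c.2) && decide (c.2 < cols) &&
    (pvCell matrix c.1 c.2 == some "1") && !(PySem.Set.contains cluster c)

-- ===== PORT A =====
-- A's dfs; the Nat is fuel, one unit per dfs call, threaded through the computation and
-- returned; it is a totality guard only (8*rows*cols+9 at top level always suffices).
-- `min r.2.2 fuel` is a no-op (returned fuel never exceeds the fuel passed in, see
-- pvDfs_inv below); it is written only so the termination measure is syntactically decreasing.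
mutual
def pvDfsA (matrix : List (List String)) (rows cols : Int) :
    Nat → PySem.Set (Int × Int) → PySem.Set (Int × Int) → Int → Int →
      PySem.Set (Int × Int) × PySem.Set (Int × Int) × Nat
  | 0, v, cl, _, _ => (v, cl, 0)
  | fuel+1, v, cl, i, j =>
      if pvGuard matrix rows cols v i j then (v, cl, fuel)
      else
        let v' := PySem.Set.add v (i, j)
        let cl' := PySem.Set.add cl (i, j)
        if 3 < PySem.Set.len cl' then (v', PySem.Set.empty, fuel)
        else pvDfsListA matrix rows cols fuel v' cl' (pvNbrs i j)
  termination_by fuel _ _ _ _ => (fuel, 0)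
  decreasing_by simp [Prod.lex_def]

-- the `for x, y in [...]` loop of dfs, with its early `return set()` after each call
def pvDfsListA (matrix : List (List String)) (rows cols : Int) :
    Nat → PySem.Set (Int × Int) → PySem.Set (Int × Int) → List (Int × Int) →
      PySem.Set (Int × Int) × PySem.Set (Int × Int) × Nat
  | fuel, v, cl, [] => (v, cl, fuel)
  | fuel, v, cl, c :: cs =>
      let r := pvDfsA matrix rows cols fuel v cl c.1 c.2
      if 3 < PySem.Set.len r.2.1 then (r.1, PySem.Set.empty, r.2.2)
      else pvDfsListA matrix rows cols (min r.2.2 fuel) r.1 r.2.1 cs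
  termination_by fuel _ _ cs => (fuel, cs.length + 1)
  decreasing_by all_goals (simp [Prod.lex_def]; try omega)
end

-- A's is_isolated: early-return recursion over the cluster's cells, inner scan of the 8 neighbours
def pvIsolatedA (matrix : List (List String)) (rows cols : Int)
    (cluster : PySem.Set (Int × Int)) : List (Int × Int) → Bool
  | [] => true
  | c :: rest =>
      if (pvNbrs c.1 c.2).any (pvIsBad matrix rows cols cluster) then false
      else pvIsolatedA matrix rows cols cluster rest

-- body of A's inner `for j in range(cols)` loop; state = (count, visited)
def pvStepA (matrix : List (List String)) (rows cols : Int) (fuel : Nat)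
    (i : Int) (st : Int × PySem.Set (Int × Int)) (j : Int) : Int × PySem.Set (Int × Int) :=
  if (pvCell matrix i j == some "1") && !(PySem.Set.contains st.2 (i, j)) then
    let r := pvDfsA matrix rows cols fuel st.2 PySem.Set.empty i j
    if (PySem.Set.len r.2.1 == 3) && pvIsolatedA matrix rows cols r.2.1 r.2.1 then
      (st.1 + 1, r.1)
    else (st.1, r.1)
  else st

def numara_clustere_de_trei (matrix : List (List String)) : Int :=
  let rows : Int := matrix.length
  let cols : Int := (matrix.headD []).length   -- len(matrix[0]); Pre_ excludes matrix = []
  let fuel : Nat := 8 * matrix.length * (matrix.headD []).length + 9  -- totality guard only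
  (((PySem.List.pyRange 0 rows).foldl (fun st i =>
      (PySem.List.pyRange 0 cols).foldl (pvStepA matrix rows cols fuel i) st)
    ((0 : Int), PySem.Set.empty))).1

-- ===== PORT B =====
-- B's while-loop: an explicit stack, top = head (Python pushes the 8 neighbours reversed and
-- pops from the end, i.e. the head of this list); fuel = one unit per popped cell (guard only)
def pvLoopB (matrix : List (List String)) (rows cols : Int) :
    Nat → PySem.Set (Int × Int) → PySem.Set (Int × Int) → List (Int × Int) →
      PySem.Set (Int × Int) × PySem.Set (Int × Int)
  | _, v, cl, [] => (v, cl)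
  | 0, v, cl, _ :: _ => (v, cl)
  | fuel+1, v, cl, c :: rest =>
      if pvGuard matrix rows cols v c.1 c.2 then pvLoopB matrix rows cols fuel v cl rest
      else
        let v' := PySem.Set.add v c
        let cl' := PySem.Set.add cl c
        if 3 < PySem.Set.len cl' then pvLoopB matrix rows cols fuel v' PySem.Set.empty rest
        else pvLoopB matrix rows cols fuel v' cl' (pvNbrs c.1 c.2 ++ rest)

-- B's direction offsets NB
def pvDirs : List (Int × Int) :=
  [(-1,0), (1,0), (0,-1), (0,1), (-1,-1), (-1,1), (1,-1), (1,1)]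

-- B's all(...) over the cluster × NB product
def pvIsolatedB (matrix : List (List String)) (rows cols : Int)
    (cluster : PySem.Set (Int × Int)) : Bool :=
  (cluster.flatMap (fun c => pvDirs.map (fun d => (c.1 + d.1, c.2 + d.2)))).all
    (fun c => !(pvIsBad matrix rows cols cluster c))

-- body of B's inner `for sj in range(cols)` loop; state = (count, visited)
def pvStepB (matrix : List (List String)) (rows cols : Int) (fuel : Nat)
    (i : Int) (st : Int × PySem.Set (Int × Int)) (j : Int) : Int × PySem.Set (Int × Int) :=
  if !(pvCell matrix i j == some "1") || PySem.Set.contains st.2 (i, j) then st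
  else
    let r := pvLoopB matrix rows cols fuel st.2 PySem.Set.empty [(i, j)]
    if (PySem.Set.len r.2 == 3) && pvIsolatedB matrix rows cols r.2 then
      (st.1 + 1, r.1)
    else (st.1, r.1)

def numara_clustere_de_trei_alt (matrix : List (List String)) : Int :=
  let rows : Int := matrix.length
  let cols : Int := (matrix.headD []).length   -- len(matrix[0]); Pre_ excludes matrix = []
  let fuel : Nat := 8 * matrix.length * (matrix.headD []).length + 9  -- totality guard only
  (((PySem.List.pyRange 0 rows).foldl (fun st i =>
      (PySem.List.pyRange 0 cols).foldl (pvStepB matrix rows cols fuel i) st)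
    ((0 : Int), PySem.Set.empty))).1

-- ===== PRECONDITION & SPEC =====
-- Pre_ excludes exactly the inputs where A raises IndexError: the empty matrix (matrix[0])
-- and matrices with a row shorter than row 0 (the outer loop reads matrix[i][j] for every
-- j < len(matrix[0])).
def Pre_numara_clustere_de_trei (matrix : List (List String)) : Prop :=
  matrix ≠ [] ∧ ∀ row ∈ matrix, (matrix.headD []).length ≤ row.length
instance (matrix : List (List String)) : Decidable (Pre_numara_clustere_de_trei matrix) := by
  unfold Pre_numara_clustere_de_trei; infer_instance

def pvWitness_numara_clustere_de_trei : List (List String) :=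
  [["1", "1", "0"], ["1", "0", "0"], ["0", "0", "1"]]

def Spec_numara_clustere_de_trei (matrix : List (List String)) (out : Int) : Prop := out = numara_clustere_de_trei_alt matrix
instance (matrix : List (List String)) (out : Int) : Decidable (Spec_numara_clustere_de_trei matrix out) := by unfold Spec_numara_clustere_de_trei; infer_instance

-- ===== CLAIM (what is proved, stated in full; the proofs are below) =====
def Claim_equal_numara_clustere_de_trei : Prop := ∀ (matrix : List (List String)), Dom_numara_clustere_de_trei matrix → Pre_numara_clustere_de_trei matrix → Spec_numara_clustere_de_trei matrix (numara_clustere_de_trei matrix)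

-- ===== LEMMAS AND PROOFS =====

-- exhausted fuel: the stack loop returns the current state
theorem pvLoopB_zero (matrix : List (List String)) (rows cols : Int)
    (v cl : PySem.Set (Int × Int)) (stack : List (Int × Int)) :
    pvLoopB matrix rows cols 0 v cl stack = (v, cl) := by
  cases stack <;> simp [pvLoopB]

-- returned fuel never exceeds the fuel passed in, and a cluster of at most three cells
-- stays at most three cells (it is reset to empty when it would reach four)
theorem pvDfs_inv (matrix : List (List String)) (rows cols : Int) :
    ∀ fuel : Nat,
      (∀ v cl i j,
        (pvDfsA matrix rows cols fuel v cl i j).2.2 ≤ fuel ∧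
          (PySem.Set.len cl ≤ 3 → PySem.Set.len (pvDfsA matrix rows cols fuel v cl i j).2.1 ≤ 3)) ∧
      (∀ cs v cl,
        (pvDfsListA matrix rows cols fuel v cl cs).2.2 ≤ fuel ∧
          (PySem.Set.len cl ≤ 3 → PySem.Set.len (pvDfsListA matrix rows cols fuel v cl cs).2.1 ≤ 3)) := by
  intro fuel
  induction fuel using Nat.strong_induction_on with
  | _ fuel IH =>
    have hA : ∀ v cl i j, (pvDfsA matrix rows cols fuel v cl i j).2.2 ≤ fuel ∧
        (PySem.Set.len cl ≤ 3 → PySem.Set.len (pvDfsA matrix rows cols fuel v cl i j).2.1 ≤ 3) := by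
      intro v cl i j
      cases fuel with
      | zero => simp [pvDfsA]
      | succ f =>
        rw [pvDfsA]
        by_cases hg : pvGuard matrix rows cols v i j = true
        · simp [hg]
        · simp only [hg, Bool.false_eq_true, if_false]
          by_cases hl : 3 < PySem.Set.len (PySem.Set.add cl (i, j))
          · simp only [hl, if_true]
            refine ⟨by omega, fun _ => ?_⟩
            simp [PySem.Set.empty, PySem.Set.len]
          · simp only [hl, if_false]
            obtain ⟨h1, h2⟩ :=
              (IH f (Nat.lt_succ_self f)).2 (pvNbrs i j) (PySem.Set.add v (i, j)) (PySem.Set.add cl (i, j))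
            exact ⟨le_trans h1 (Nat.le_succ f), fun _ => h2 (by omega)⟩
    have hL : ∀ cs v cl, (pvDfsListA matrix rows cols fuel v cl cs).2.2 ≤ fuel ∧
        (PySem.Set.len cl ≤ 3 → PySem.Set.len (pvDfsListA matrix rows cols fuel v cl cs).2.1 ≤ 3) := by
      intro cs
      induction cs with
      | nil => intro v cl; simp [pvDfsListA]
      | cons c cs ihcs =>
        intro v cl
        rw [pvDfsListA]
        obtain ⟨ha1, ha2⟩ := hA v cl c.1 c.2
        by_cases hb : 3 < PySem.Set.len (pvDfsA matrix rows cols fuel v cl c.1 c.2).2.1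
        · simp only [hb, if_true]
          refine ⟨ha1, fun _ => ?_⟩
          simp [PySem.Set.empty, PySem.Set.len]
        · simp only [hb, if_false]
          rcases Nat.lt_or_ge (min (pvDfsA matrix rows cols fuel v cl c.1 c.2).2.2 fuel) fuel with hlt | hge
          · obtain ⟨h1, h2⟩ := (IH _ hlt).2 cs
              (pvDfsA matrix rows cols fuel v cl c.1 c.2).1
              (pvDfsA matrix rows cols fuel v cl c.1 c.2).2.1
            exact ⟨by omega, fun hcl => h2 (ha2 hcl)⟩
          · have heq : min (pvDfsA matrix rows cols fuel v cl c.1 c.2).2.2 fuel = fuel := by omega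
            rw [heq]
            obtain ⟨h1, h2⟩ := ihcs (pvDfsA matrix rows cols fuel v cl c.1 c.2).1
              (pvDfsA matrix rows cols fuel v cl c.1 c.2).2.1
            exact ⟨h1, fun hcl => h2 (ha2 hcl)⟩
    exact ⟨hA, hL⟩

-- the list loop with no fuel left is the identity on (visited, cluster)
theorem pvDfsListA_zero (matrix : List (List String)) (rows cols : Int) :
    ∀ (cs : List (Int × Int)) (v cl : PySem.Set (Int × Int)), PySem.Set.len cl ≤ 3 →
      pvDfsListA matrix rows cols 0 v cl cs = (v, cl, 0) := by
  intro cs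
  induction cs with
  | nil => intro v cl _; simp [pvDfsListA]
  | cons c cs ih =>
    intro v cl h
    rw [pvDfsListA]
    have hd : pvDfsA matrix rows cols 0 v cl c.1 c.2 = (v, cl, 0) := by simp [pvDfsA]
    rw [hd]
    simp only []
    rw [if_neg (by simpa using not_lt.mpr h)]
    exact ih v cl h

-- simulation: running B's stack loop on cells ++ stack = A's neighbour loop on cells,
-- then the stack loop on the rest
theorem pvLoop_eq (matrix : List (List String)) (rows cols : Int) :
    ∀ (fuel : Nat) (cells stack : List (Int × Int)) (v cl : PySem.Set (Int × Int)),
      PySem.Set.len cl ≤ 3 →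
      pvLoopB matrix rows cols fuel v cl (cells ++ stack) =
        pvLoopB matrix rows cols (pvDfsListA matrix rows cols fuel v cl cells).2.2
          (pvDfsListA matrix rows cols fuel v cl cells).1
          (pvDfsListA matrix rows cols fuel v cl cells).2.1 stack := by
  intro fuel
  induction fuel using Nat.strong_induction_on with
  | _ fuel IH =>
    intro cells stack v cl hcl
    cases cells with
    | nil => simp [pvDfsListA]
    | cons c cs =>
      obtain ⟨ci, cj⟩ := c
      cases fuel with
      | zero =>
        rw [List.cons_append, pvLoopB_zero,
          pvDfsListA_zero matrix rows cols ((ci, cj) :: cs) v cl hcl, pvLoopB_zero]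
      | succ f =>
        have hmin : min f (f + 1) = f := by omega
        rw [List.cons_append]
        by_cases hg : pvGuard matrix rows cols v ci cj = true
        · have hd : pvDfsA matrix rows cols (f + 1) v cl ci cj = (v, cl, f) := by
            rw [pvDfsA]; simp [hg]
          have hlist : pvDfsListA matrix rows cols (f + 1) v cl ((ci, cj) :: cs) =
              pvDfsListA matrix rows cols f v cl cs := by
            rw [pvDfsListA]; simp only [hd]
            rw [if_neg (by simpa using not_lt.mpr hcl)]
            rw [hmin]
          have hloop : pvLoopB matrix rows cols (f + 1) v cl ((ci, cj) :: (cs ++ stack)) =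
              pvLoopB matrix rows cols f v cl (cs ++ stack) := by
            rw [pvLoopB]; simp [hg]
          rw [hloop, hlist]
          exact IH f (Nat.lt_succ_self f) cs stack v cl hcl
        · by_cases hl : 3 < PySem.Set.len (PySem.Set.add cl (ci, cj))
          · have hlN : 3 < (PySem.Set.add cl (ci, cj)).length := by
              simp only [PySem.Set.len] at hl; exact_mod_cast hl
            have hd : pvDfsA matrix rows cols (f + 1) v cl ci cj =
                (PySem.Set.add v (ci, cj), PySem.Set.empty, f) := by
              rw [pvDfsA]; simp [hg, hlN]
            have hlist : pvDfsListA matrix rows cols (f + 1) v cl ((ci, cj) :: cs) =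
                pvDfsListA matrix rows cols f (PySem.Set.add v (ci, cj)) PySem.Set.empty cs := by
              rw [pvDfsListA]; simp only [hd]
              rw [if_neg (by simp [PySem.Set.empty, PySem.Set.len])]
              rw [hmin]
            have hloop : pvLoopB matrix rows cols (f + 1) v cl ((ci, cj) :: (cs ++ stack)) =
                pvLoopB matrix rows cols f (PySem.Set.add v (ci, cj)) PySem.Set.empty (cs ++ stack) := by
              rw [pvLoopB]; simp [hg, hlN]
            rw [hloop, hlist]
            exact IH f (Nat.lt_succ_self f) cs stack _ _ (by simp [PySem.Set.empty, PySem.Set.len])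
          · have hlN : ¬ 3 < (PySem.Set.add cl (ci, cj)).length := by
              simp only [PySem.Set.len] at hl; exact_mod_cast hl
            have hd : pvDfsA matrix rows cols (f + 1) v cl ci cj =
                pvDfsListA matrix rows cols f (PySem.Set.add v (ci, cj)) (PySem.Set.add cl (ci, cj))
                  (pvNbrs ci cj) := by
              rw [pvDfsA]; simp [hg, hlN]
            have hcl' : PySem.Set.len (PySem.Set.add cl (ci, cj)) ≤ 3 := by omega
            obtain ⟨hf1, hcl1⟩ := (pvDfs_inv matrix rows cols f).2 (pvNbrs ci cj)
              (PySem.Set.add v (ci, cj)) (PySem.Set.add cl (ci, cj))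
            have hcl1' := hcl1 hcl'
            have hlist : pvDfsListA matrix rows cols (f + 1) v cl ((ci, cj) :: cs) =
                pvDfsListA matrix rows cols
                  (pvDfsListA matrix rows cols f (PySem.Set.add v (ci, cj)) (PySem.Set.add cl (ci, cj)) (pvNbrs ci cj)).2.2
                  (pvDfsListA matrix rows cols f (PySem.Set.add v (ci, cj)) (PySem.Set.add cl (ci, cj)) (pvNbrs ci cj)).1
                  (pvDfsListA matrix rows cols f (PySem.Set.add v (ci, cj)) (PySem.Set.add cl (ci, cj)) (pvNbrs ci cj)).2.1
                  cs := by
              rw [pvDfsListA]; simp only [hd]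
              rw [if_neg (not_lt.mpr hcl1')]
              rw [Nat.min_eq_left (le_trans hf1 (Nat.le_succ f))]
            have hloop : pvLoopB matrix rows cols (f + 1) v cl ((ci, cj) :: (cs ++ stack)) =
                pvLoopB matrix rows cols f (PySem.Set.add v (ci, cj)) (PySem.Set.add cl (ci, cj))
                  (pvNbrs ci cj ++ (cs ++ stack)) := by
              rw [pvLoopB]; simp [hg, hlN]
            rw [hloop]
            rw [IH f (Nat.lt_succ_self f) (pvNbrs ci cj) (cs ++ stack) _ _ hcl']
            rw [IH _ (Nat.lt_succ_of_le hf1) cs stack _ _ hcl1']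
            rw [hlist]

-- B's whole component run = A's top-level dfs call
theorem pvLoop_single (matrix : List (List String)) (rows cols : Int) (fuel : Nat)
    (v : PySem.Set (Int × Int)) (i j : Int) :
    pvLoopB matrix rows cols fuel v PySem.Set.empty [(i, j)] =
      ((pvDfsA matrix rows cols fuel v PySem.Set.empty i j).1,
        (pvDfsA matrix rows cols fuel v PySem.Set.empty i j).2.1) := by
  have h0 : PySem.Set.len (PySem.Set.empty : PySem.Set (Int × Int)) ≤ 3 := by
    simp [PySem.Set.empty, PySem.Set.len]
  obtain ⟨hf1, hcl1⟩ := (pvDfs_inv matrix rows cols fuel).1 v PySem.Set.empty i j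
  have hclN : ¬ 3 < (pvDfsA matrix rows cols fuel v PySem.Set.empty i j).2.1.length := by
    have h := hcl1 h0; simp only [PySem.Set.len] at h; exact_mod_cast not_lt.mpr h
  have h := pvLoop_eq matrix rows cols fuel [(i, j)] [] v PySem.Set.empty h0
  simp only [List.append_nil] at h
  simp only [PySem.Set.empty] at hclN
  rw [h, pvDfsListA]
  simp [hclN, pvDfsListA, pvLoopB]

theorem pvDirs_map (i j : Int) :
    pvDirs.map (fun d => (i + d.1, j + d.2)) = pvNbrs i j := by
  simp [pvDirs, pvNbrs, Prod.ext_iff]; omega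

theorem pvIsolatedA_eq (matrix : List (List String)) (rows cols : Int)
    (cluster : PySem.Set (Int × Int)) :
    ∀ cells : List (Int × Int),
      pvIsolatedA matrix rows cols cluster cells =
        (cells.flatMap (fun c => pvDirs.map (fun d => (c.1 + d.1, c.2 + d.2)))).all
          (fun c => !(pvIsBad matrix rows cols cluster c)) := by
  intro cells
  induction cells with
  | nil => simp [pvIsolatedA]
  | cons c rest ih =>
    rw [pvIsolatedA, List.flatMap_cons, List.all_append, pvDirs_map,
      ← List.not_any_eq_all_not, ih]
    cases h : (pvNbrs c.1 c.2).any (pvIsBad matrix rows cols cluster) <;> simp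

theorem pvIsolatedB_eq (matrix : List (List String)) (rows cols : Int)
    (cluster : PySem.Set (Int × Int)) :
    pvIsolatedB matrix rows cols cluster = pvIsolatedA matrix rows cols cluster cluster := by
  rw [pvIsolatedB, pvIsolatedA_eq]

-- the two loop bodies agree
theorem pvStep_eq (matrix : List (List String)) (rows cols : Int) (fuel : Nat) :
    pvStepA matrix rows cols fuel = pvStepB matrix rows cols fuel := by
  funext i st j
  simp only [pvStepA, pvStepB, pvIsolatedB_eq]
  rw [pvLoop_single]
  cases hc : (pvCell matrix i j == some "1") <;>
    cases hm : PySem.Set.contains st.2 (i, j) <;> simp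

-- ===== VERDICT (by name: the statement is the Claim_ definition above) =====
theorem numara_clustere_de_trei_spec : Claim_equal_numara_clustere_de_trei := by
  unfold Claim_equal_numara_clustere_de_trei
  intro matrix _ _
  unfold Spec_numara_clustere_de_trei numara_clustere_de_trei numara_clustere_de_trei_alt
  simp only [pvStep_eq]
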